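-- pv_equiv track=rewrite | github.com/tomoshiekah/AoC | AoC2023/day01.py | checkIfNumber
-- ===== SOURCE A (Python) =====
-- NUMBERS = {
--     "one" : 1,
--     "two" : 2,
--     "three" : 3,
--     "four" : 4,
--     "five" : 5,
--     "six" : 6,
--     "seven" : 7,
--     "eight" : 8,
--     "nine" : 9
-- }
--
-- def checkIfNumber(input, index, first):
--     for written in NUMBERS.keys():
--         if not first:
--             written = written[::-1]
--
--         if input[index: index+len(written)] == written:
--             if not first:
--                 return NUMBERS[written[::-1]]
--             return NUMBERS[written]
-- ===== SOURCE B (Python) =====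
-- WORDS3 = {"one": 1, "two": 2, "six": 6}
-- WORDS4 = {"four": 4, "five": 5, "nine": 9}
-- WORDS5 = {"three": 3, "seven": 7, "eight": 8}
--
-- def checkIfNumber(input, index, first):
--     s3 = input[index: index + 3]
--     s4 = input[index: index + 4]
--     s5 = input[index: index + 5]
--     if not first:
--         s3, s4, s5 = s3[::-1], s4[::-1], s5[::-1]
--     return WORDS3.get(s3) or WORDS4.get(s4) or WORDS5.get(s5)
-- ===== Notes on version B (the rewrite author's own statement) =====
-- stated objective: simpler
-- what changed: B replaces A's loop over the nine number words (one slice + equality test per word) by loop-free straight-line code: one slice per distinct word length (3, 4, 5), reversed for the backward scan, probed once in a per-length dict and chained with 'or'; correct because at most one word can match at a given index.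
import Mathlib
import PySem

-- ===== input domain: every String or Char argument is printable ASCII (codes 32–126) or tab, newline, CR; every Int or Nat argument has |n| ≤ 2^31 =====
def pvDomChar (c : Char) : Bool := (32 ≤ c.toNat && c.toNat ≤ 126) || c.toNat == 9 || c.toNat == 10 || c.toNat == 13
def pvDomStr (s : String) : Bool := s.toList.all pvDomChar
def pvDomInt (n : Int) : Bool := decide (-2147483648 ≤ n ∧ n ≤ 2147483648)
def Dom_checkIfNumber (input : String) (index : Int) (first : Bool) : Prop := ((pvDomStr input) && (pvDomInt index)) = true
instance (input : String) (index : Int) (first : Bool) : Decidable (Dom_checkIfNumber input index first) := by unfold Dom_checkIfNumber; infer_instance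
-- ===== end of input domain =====

-- B replaces A's loop over the nine number words (a slice + comparison per word) by loop-free
-- straight-line code: one slice per distinct word length (3, 4, 5), reversed for the backward scan,
-- and one dict probe per slice chained with Python's 'or'; simpler, same return value.

-- ===== PORT A =====
-- the NUMBERS dict of Source A (keys as char lists, in insertion order)
def numbersA : List (List Char × Int) :=
  [(['o','n','e'], 1), (['t','w','o'], 2), (['t','h','r','e','e'], 3), (['f','o','u','r'], 4),
   (['f','i','v','e'], 5), (['s','i','x'], 6), (['s','e','v','e','n'], 7), (['e','i','g','h','t'], 8),
   (['n','i','n','e'], 9)]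

-- the 'for written in NUMBERS.keys()' loop with its early returns
def loopA (l : List Char) (index : Int) (first : Bool) : List (List Char × Int) → Option Int
  | [] => none
  | (w, v) :: rest =>
    let written := if !first then w.reverse else w
    if PySem.List.slice l (some index) (some (index + written.length)) = written then some v
    else loopA l index first rest

def checkIfNumber (input : String) (index : Int) (first : Bool) : Option Int :=
  loopA input.toList index first numbersA

-- ===== PORT B =====
-- WORDS3 / WORDS4 / WORDS5 of Source B
def words3 : PySem.Dict (List Char) Int := PySem.Dict.mk [(['o','n','e'], 1), (['t','w','o'], 2), (['s','i','x'], 6)]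
def words4 : PySem.Dict (List Char) Int := PySem.Dict.mk [(['f','o','u','r'], 4), (['f','i','v','e'], 5), (['n','i','n','e'], 9)]
def words5 : PySem.Dict (List Char) Int := PySem.Dict.mk [(['t','h','r','e','e'], 3), (['s','e','v','e','n'], 7), (['e','i','g','h','t'], 8)]

-- Source B straight-line body; Python's 'x or y' over dict .get results (values 1..9, never falsy)
-- is exactly "first non-None", ported as the nested match.
def checkIfNumber_alt (input : String) (index : Int) (first : Bool) : Option Int :=
  let l := input.toList
  let s3 := PySem.List.slice l (some index) (some (index + 3))
  let s4 := PySem.List.slice l (some index) (some (index + 4))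
  let s5 := PySem.List.slice l (some index) (some (index + 5))
  let t3 := if !first then s3.reverse else s3
  let t4 := if !first then s4.reverse else s4
  let t5 := if !first then s5.reverse else s5
  match words3.get? t3 with
  | some v => some v
  | none =>
    match words4.get? t4 with
    | some v => some v
    | none => words5.get? t5

-- ===== PRECONDITION & SPEC =====
def Spec_checkIfNumber (input : String) (index : Int) (first : Bool) (out : Option Int) : Prop := out = checkIfNumber_alt input index first
instance (input : String) (index : Int) (first : Bool) (out : Option Int) : Decidable (Spec_checkIfNumber input index first out) := by unfold Spec_checkIfNumber; infer_instance

-- ===== CLAIM (what is proved, stated in full; the proofs are below) =====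
def Claim_equal_checkIfNumber : Prop := ∀ (input : String) (index : Int) (first : Bool), Dom_checkIfNumber input index first → Spec_checkIfNumber input index first (checkIfNumber input index first)

-- ===== LEMMAS AND PROOFS =====

-- Python slices x[i:i+m] and x[i:i+n] (m ≤ n) taken at the same start: the shorter is a prefix of the
-- longer PROVIDED the longer one is "full" (has length n) — this can fail when i+n crosses 0, but then
-- the longer slice is not full and cannot equal a number word.
lemma slice_prefix_of_full (l : List Char) (i m n : Int) (h0 : 0 ≤ m) (hmn : m ≤ n)
    (hfull : ((PySem.List.slice l (some i) (some (i+n))).length : Int) = n) :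
    PySem.List.slice l (some i) (some (i+m)) <+: PySem.List.slice l (some i) (some (i+n)) := by
  simp only [PySem.List.slice, PySem.List.clampIdx, List.length_take, List.length_drop] at *
  apply List.take_prefix_take_left
  split_ifs at * <;> omega

-- ===== VERDICT (by name: the statement is the Claim_ definition above) =====
theorem checkIfNumber_spec : Claim_equal_checkIfNumber := by
  intro input index first _
  unfold Spec_checkIfNumber checkIfNumber checkIfNumber_alt
  cases first
  case false =>
    by_cases h1 : PySem.List.slice input.toList (some index) (some (index + 3)) = ['e','n','o']
    · simp [loopA, numbersA, words3, h1, PySem.Dict.get?]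
    by_cases h2 : PySem.List.slice input.toList (some index) (some (index + 3)) = ['o','w','t']
    · have r1 : (PySem.List.slice input.toList (some index) (some (index + 3))).reverse ≠ ['o','n','e'] := fun hx => h1 (by simpa using List.reverse_eq_iff.mp hx)
      simp [loopA, numbersA, words3, h2, PySem.Dict.get?]
    by_cases h3 : PySem.List.slice input.toList (some index) (some (index + 5)) = ['e','e','r','h','t']
    · have hf : ((PySem.List.slice input.toList (some index) (some (index + 5))).length : Int) = 5 := by rw [h3]; rfl
      have p35 := slice_prefix_of_full input.toList index 3 5 (by omega) (by omega) hf
      rw [h3] at p35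
      have p45 := slice_prefix_of_full input.toList index 4 5 (by omega) (by omega) hf
      rw [h3] at p45
      have n6 : PySem.List.slice input.toList (some index) (some (index + 3)) ≠ ['x','i','s'] := by
        intro hx; rw [hx] at p35; exact absurd p35 (by decide)
      have n4 : PySem.List.slice input.toList (some index) (some (index + 4)) ≠ ['r','u','o','f'] := by
        intro hx; rw [hx] at p45; exact absurd p45 (by decide)
      have n5 : PySem.List.slice input.toList (some index) (some (index + 4)) ≠ ['e','v','i','f'] := by
        intro hx; rw [hx] at p45; exact absurd p45 (by decide)
      have n9 : PySem.List.slice input.toList (some index) (some (index + 4)) ≠ ['e','n','i','n'] := by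
        intro hx; rw [hx] at p45; exact absurd p45 (by decide)
      have r1 : (PySem.List.slice input.toList (some index) (some (index + 3))).reverse ≠ ['o','n','e'] := fun hx => h1 (by simpa using List.reverse_eq_iff.mp hx)
      have r2 : (PySem.List.slice input.toList (some index) (some (index + 3))).reverse ≠ ['t','w','o'] := fun hx => h2 (by simpa using List.reverse_eq_iff.mp hx)
      have rn6 : (PySem.List.slice input.toList (some index) (some (index + 3))).reverse ≠ ['s','i','x'] := fun hx => n6 (by simpa using List.reverse_eq_iff.mp hx)
      have rn4 : (PySem.List.slice input.toList (some index) (some (index + 4))).reverse ≠ ['f','o','u','r'] := fun hx => n4 (by simpa using List.reverse_eq_iff.mp hx)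
      have rn5 : (PySem.List.slice input.toList (some index) (some (index + 4))).reverse ≠ ['f','i','v','e'] := fun hx => n5 (by simpa using List.reverse_eq_iff.mp hx)
      have rn9 : (PySem.List.slice input.toList (some index) (some (index + 4))).reverse ≠ ['n','i','n','e'] := fun hx => n9 (by simpa using List.reverse_eq_iff.mp hx)
      simp [loopA, numbersA, words3, words4, words5, h1, Ne.symm r1, h2, Ne.symm r2, Ne.symm rn6, Ne.symm rn4, Ne.symm rn5, Ne.symm rn9, h3, PySem.Dict.get?, beq_iff_eq]
    by_cases h4 : PySem.List.slice input.toList (some index) (some (index + 4)) = ['r','u','o','f']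
    · have hf : ((PySem.List.slice input.toList (some index) (some (index + 4))).length : Int) = 4 := by rw [h4]; rfl
      have p34 := slice_prefix_of_full input.toList index 3 4 (by omega) (by omega) hf
      rw [h4] at p34
      have n6 : PySem.List.slice input.toList (some index) (some (index + 3)) ≠ ['x','i','s'] := by
        intro hx; rw [hx] at p34; exact absurd p34 (by decide)
      have r1 : (PySem.List.slice input.toList (some index) (some (index + 3))).reverse ≠ ['o','n','e'] := fun hx => h1 (by simpa using List.reverse_eq_iff.mp hx)
      have r2 : (PySem.List.slice input.toList (some index) (some (index + 3))).reverse ≠ ['t','w','o'] := fun hx => h2 (by simpa using List.reverse_eq_iff.mp hx)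
      have r3 : (PySem.List.slice input.toList (some index) (some (index + 5))).reverse ≠ ['t','h','r','e','e'] := fun hx => h3 (by simpa using List.reverse_eq_iff.mp hx)
      have rn6 : (PySem.List.slice input.toList (some index) (some (index + 3))).reverse ≠ ['s','i','x'] := fun hx => n6 (by simpa using List.reverse_eq_iff.mp hx)
      simp [loopA, numbersA, words3, words4, h1, Ne.symm r1, h2, Ne.symm r2, h3, Ne.symm rn6, h4, PySem.Dict.get?, beq_iff_eq]
    by_cases h5 : PySem.List.slice input.toList (some index) (some (index + 4)) = ['e','v','i','f']
    · have hf : ((PySem.List.slice input.toList (some index) (some (index + 4))).length : Int) = 4 := by rw [h5]; rfl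
      have p34 := slice_prefix_of_full input.toList index 3 4 (by omega) (by omega) hf
      rw [h5] at p34
      have n6 : PySem.List.slice input.toList (some index) (some (index + 3)) ≠ ['x','i','s'] := by
        intro hx; rw [hx] at p34; exact absurd p34 (by decide)
      have r1 : (PySem.List.slice input.toList (some index) (some (index + 3))).reverse ≠ ['o','n','e'] := fun hx => h1 (by simpa using List.reverse_eq_iff.mp hx)
      have r2 : (PySem.List.slice input.toList (some index) (some (index + 3))).reverse ≠ ['t','w','o'] := fun hx => h2 (by simpa using List.reverse_eq_iff.mp hx)
      have r3 : (PySem.List.slice input.toList (some index) (some (index + 5))).reverse ≠ ['t','h','r','e','e'] := fun hx => h3 (by simpa using List.reverse_eq_iff.mp hx)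
      have r4 : (PySem.List.slice input.toList (some index) (some (index + 4))).reverse ≠ ['f','o','u','r'] := fun hx => h4 (by simpa using List.reverse_eq_iff.mp hx)
      have rn6 : (PySem.List.slice input.toList (some index) (some (index + 3))).reverse ≠ ['s','i','x'] := fun hx => n6 (by simpa using List.reverse_eq_iff.mp hx)
      simp [loopA, numbersA, words3, words4, h1, Ne.symm r1, h2, Ne.symm r2, h3, Ne.symm rn6, Ne.symm r4, h5, PySem.Dict.get?, beq_iff_eq]
    by_cases h6 : PySem.List.slice input.toList (some index) (some (index + 3)) = ['x','i','s']
    · have r1 : (PySem.List.slice input.toList (some index) (some (index + 3))).reverse ≠ ['o','n','e'] := fun hx => h1 (by simpa using List.reverse_eq_iff.mp hx)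
      have r2 : (PySem.List.slice input.toList (some index) (some (index + 3))).reverse ≠ ['t','w','o'] := fun hx => h2 (by simpa using List.reverse_eq_iff.mp hx)
      simp [loopA, numbersA, words3, h1, Ne.symm r1, h2, Ne.symm r2, h3, h4, h5, h6, PySem.Dict.get?, beq_iff_eq]
    by_cases h7 : PySem.List.slice input.toList (some index) (some (index + 5)) = ['n','e','v','e','s']
    · have hf : ((PySem.List.slice input.toList (some index) (some (index + 5))).length : Int) = 5 := by rw [h7]; rfl
      have p45 := slice_prefix_of_full input.toList index 4 5 (by omega) (by omega) hf
      rw [h7] at p45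
      have n9 : PySem.List.slice input.toList (some index) (some (index + 4)) ≠ ['e','n','i','n'] := by
        intro hx; rw [hx] at p45; exact absurd p45 (by decide)
      have r1 : (PySem.List.slice input.toList (some index) (some (index + 3))).reverse ≠ ['o','n','e'] := fun hx => h1 (by simpa using List.reverse_eq_iff.mp hx)
      have r2 : (PySem.List.slice input.toList (some index) (some (index + 3))).reverse ≠ ['t','w','o'] := fun hx => h2 (by simpa using List.reverse_eq_iff.mp hx)
      have r3 : (PySem.List.slice input.toList (some index) (some (index + 5))).reverse ≠ ['t','h','r','e','e'] := fun hx => h3 (by simpa using List.reverse_eq_iff.mp hx)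
      have r4 : (PySem.List.slice input.toList (some index) (some (index + 4))).reverse ≠ ['f','o','u','r'] := fun hx => h4 (by simpa using List.reverse_eq_iff.mp hx)
      have r5 : (PySem.List.slice input.toList (some index) (some (index + 4))).reverse ≠ ['f','i','v','e'] := fun hx => h5 (by simpa using List.reverse_eq_iff.mp hx)
      have r6 : (PySem.List.slice input.toList (some index) (some (index + 3))).reverse ≠ ['s','i','x'] := fun hx => h6 (by simpa using List.reverse_eq_iff.mp hx)
      have rn9 : (PySem.List.slice input.toList (some index) (some (index + 4))).reverse ≠ ['n','i','n','e'] := fun hx => n9 (by simpa using List.reverse_eq_iff.mp hx)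
      simp [loopA, numbersA, words3, words4, words5, h1, Ne.symm r1, h2, Ne.symm r2, Ne.symm r3, h4, Ne.symm r4, h5, Ne.symm r5, h6, Ne.symm r6, Ne.symm rn9, h7, PySem.Dict.get?, beq_iff_eq]
    by_cases h8 : PySem.List.slice input.toList (some index) (some (index + 5)) = ['t','h','g','i','e']
    · have hf : ((PySem.List.slice input.toList (some index) (some (index + 5))).length : Int) = 5 := by rw [h8]; rfl
      have p45 := slice_prefix_of_full input.toList index 4 5 (by omega) (by omega) hf
      rw [h8] at p45
      have n9 : PySem.List.slice input.toList (some index) (some (index + 4)) ≠ ['e','n','i','n'] := by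
        intro hx; rw [hx] at p45; exact absurd p45 (by decide)
      have r1 : (PySem.List.slice input.toList (some index) (some (index + 3))).reverse ≠ ['o','n','e'] := fun hx => h1 (by simpa using List.reverse_eq_iff.mp hx)
      have r2 : (PySem.List.slice input.toList (some index) (some (index + 3))).reverse ≠ ['t','w','o'] := fun hx => h2 (by simpa using List.reverse_eq_iff.mp hx)
      have r3 : (PySem.List.slice input.toList (some index) (some (index + 5))).reverse ≠ ['t','h','r','e','e'] := fun hx => h3 (by simpa using List.reverse_eq_iff.mp hx)
      have r4 : (PySem.List.slice input.toList (some index) (some (index + 4))).reverse ≠ ['f','o','u','r'] := fun hx => h4 (by simpa using List.reverse_eq_iff.mp hx)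
      have r5 : (PySem.List.slice input.toList (some index) (some (index + 4))).reverse ≠ ['f','i','v','e'] := fun hx => h5 (by simpa using List.reverse_eq_iff.mp hx)
      have r6 : (PySem.List.slice input.toList (some index) (some (index + 3))).reverse ≠ ['s','i','x'] := fun hx => h6 (by simpa using List.reverse_eq_iff.mp hx)
      have r7 : (PySem.List.slice input.toList (some index) (some (index + 5))).reverse ≠ ['s','e','v','e','n'] := fun hx => h7 (by simpa using List.reverse_eq_iff.mp hx)
      have rn9 : (PySem.List.slice input.toList (some index) (some (index + 4))).reverse ≠ ['n','i','n','e'] := fun hx => n9 (by simpa using List.reverse_eq_iff.mp hx)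
      simp [loopA, numbersA, words3, words4, words5, h1, Ne.symm r1, h2, Ne.symm r2, Ne.symm r3, h4, Ne.symm r4, h5, Ne.symm r5, h6, Ne.symm r6, Ne.symm r7, Ne.symm rn9, h8, PySem.Dict.get?, beq_iff_eq]
    by_cases h9 : PySem.List.slice input.toList (some index) (some (index + 4)) = ['e','n','i','n']
    · have r1 : (PySem.List.slice input.toList (some index) (some (index + 3))).reverse ≠ ['o','n','e'] := fun hx => h1 (by simpa using List.reverse_eq_iff.mp hx)
      have r2 : (PySem.List.slice input.toList (some index) (some (index + 3))).reverse ≠ ['t','w','o'] := fun hx => h2 (by simpa using List.reverse_eq_iff.mp hx)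
      have r3 : (PySem.List.slice input.toList (some index) (some (index + 5))).reverse ≠ ['t','h','r','e','e'] := fun hx => h3 (by simpa using List.reverse_eq_iff.mp hx)
      have r4 : (PySem.List.slice input.toList (some index) (some (index + 4))).reverse ≠ ['f','o','u','r'] := fun hx => h4 (by simpa using List.reverse_eq_iff.mp hx)
      have r5 : (PySem.List.slice input.toList (some index) (some (index + 4))).reverse ≠ ['f','i','v','e'] := fun hx => h5 (by simpa using List.reverse_eq_iff.mp hx)
      have r6 : (PySem.List.slice input.toList (some index) (some (index + 3))).reverse ≠ ['s','i','x'] := fun hx => h6 (by simpa using List.reverse_eq_iff.mp hx)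
      have r7 : (PySem.List.slice input.toList (some index) (some (index + 5))).reverse ≠ ['s','e','v','e','n'] := fun hx => h7 (by simpa using List.reverse_eq_iff.mp hx)
      have r8 : (PySem.List.slice input.toList (some index) (some (index + 5))).reverse ≠ ['e','i','g','h','t'] := fun hx => h8 (by simpa using List.reverse_eq_iff.mp hx)
      simp [loopA, numbersA, words3, words4, words5, h1, Ne.symm r1, h2, Ne.symm r2, Ne.symm r3, h4, Ne.symm r4, h5, Ne.symm r5, h6, Ne.symm r6, Ne.symm r7, Ne.symm r8, h9, h3, h7, h8, PySem.Dict.get?, beq_iff_eq]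
    have r1 : (PySem.List.slice input.toList (some index) (some (index + 3))).reverse ≠ ['o','n','e'] := fun hx => h1 (by simpa using List.reverse_eq_iff.mp hx)
    have r2 : (PySem.List.slice input.toList (some index) (some (index + 3))).reverse ≠ ['t','w','o'] := fun hx => h2 (by simpa using List.reverse_eq_iff.mp hx)
    have r3 : (PySem.List.slice input.toList (some index) (some (index + 5))).reverse ≠ ['t','h','r','e','e'] := fun hx => h3 (by simpa using List.reverse_eq_iff.mp hx)
    have r4 : (PySem.List.slice input.toList (some index) (some (index + 4))).reverse ≠ ['f','o','u','r'] := fun hx => h4 (by simpa using List.reverse_eq_iff.mp hx)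
    have r5 : (PySem.List.slice input.toList (some index) (some (index + 4))).reverse ≠ ['f','i','v','e'] := fun hx => h5 (by simpa using List.reverse_eq_iff.mp hx)
    have r6 : (PySem.List.slice input.toList (some index) (some (index + 3))).reverse ≠ ['s','i','x'] := fun hx => h6 (by simpa using List.reverse_eq_iff.mp hx)
    have r7 : (PySem.List.slice input.toList (some index) (some (index + 5))).reverse ≠ ['s','e','v','e','n'] := fun hx => h7 (by simpa using List.reverse_eq_iff.mp hx)
    have r8 : (PySem.List.slice input.toList (some index) (some (index + 5))).reverse ≠ ['e','i','g','h','t'] := fun hx => h8 (by simpa using List.reverse_eq_iff.mp hx)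
    have r9 : (PySem.List.slice input.toList (some index) (some (index + 4))).reverse ≠ ['n','i','n','e'] := fun hx => h9 (by simpa using List.reverse_eq_iff.mp hx)
    simp [loopA, numbersA, words3, words4, words5, h1, Ne.symm r1, h2, Ne.symm r2, h3, Ne.symm r3, h4, Ne.symm r4, h5, Ne.symm r5, h6, Ne.symm r6, h7, Ne.symm r7, h8, Ne.symm r8, h9, Ne.symm r9, PySem.Dict.get?, beq_iff_eq]
  case true =>
    by_cases h1 : PySem.List.slice input.toList (some index) (some (index + 3)) = ['o','n','e']
    · simp [loopA, numbersA, words3, h1, PySem.Dict.get?]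
    by_cases h2 : PySem.List.slice input.toList (some index) (some (index + 3)) = ['t','w','o']
    · simp [loopA, numbersA, words3, h1, Ne.symm h1, h2, PySem.Dict.get?, beq_iff_eq]
    by_cases h3 : PySem.List.slice input.toList (some index) (some (index + 5)) = ['t','h','r','e','e']
    · have hf : ((PySem.List.slice input.toList (some index) (some (index + 5))).length : Int) = 5 := by rw [h3]; rfl
      have p35 := slice_prefix_of_full input.toList index 3 5 (by omega) (by omega) hf
      rw [h3] at p35
      have p45 := slice_prefix_of_full input.toList index 4 5 (by omega) (by omega) hf
      rw [h3] at p45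
      have n6 : PySem.List.slice input.toList (some index) (some (index + 3)) ≠ ['s','i','x'] := by
        intro hx; rw [hx] at p35; exact absurd p35 (by decide)
      have n4 : PySem.List.slice input.toList (some index) (some (index + 4)) ≠ ['f','o','u','r'] := by
        intro hx; rw [hx] at p45; exact absurd p45 (by decide)
      have n5 : PySem.List.slice input.toList (some index) (some (index + 4)) ≠ ['f','i','v','e'] := by
        intro hx; rw [hx] at p45; exact absurd p45 (by decide)
      have n9 : PySem.List.slice input.toList (some index) (some (index + 4)) ≠ ['n','i','n','e'] := by
        intro hx; rw [hx] at p45; exact absurd p45 (by decide)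
      simp [loopA, numbersA, words3, words4, words5, h1, Ne.symm h1, h2, Ne.symm h2, Ne.symm n6, Ne.symm n4, Ne.symm n5, Ne.symm n9, h3, PySem.Dict.get?, beq_iff_eq]
    by_cases h4 : PySem.List.slice input.toList (some index) (some (index + 4)) = ['f','o','u','r']
    · have hf : ((PySem.List.slice input.toList (some index) (some (index + 4))).length : Int) = 4 := by rw [h4]; rfl
      have p34 := slice_prefix_of_full input.toList index 3 4 (by omega) (by omega) hf
      rw [h4] at p34
      have n6 : PySem.List.slice input.toList (some index) (some (index + 3)) ≠ ['s','i','x'] := by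
        intro hx; rw [hx] at p34; exact absurd p34 (by decide)
      simp [loopA, numbersA, words3, words4, h1, Ne.symm h1, h2, Ne.symm h2, h3, Ne.symm n6, h4, PySem.Dict.get?, beq_iff_eq]
    by_cases h5 : PySem.List.slice input.toList (some index) (some (index + 4)) = ['f','i','v','e']
    · have hf : ((PySem.List.slice input.toList (some index) (some (index + 4))).length : Int) = 4 := by rw [h5]; rfl
      have p34 := slice_prefix_of_full input.toList index 3 4 (by omega) (by omega) hf
      rw [h5] at p34
      have n6 : PySem.List.slice input.toList (some index) (some (index + 3)) ≠ ['s','i','x'] := by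
        intro hx; rw [hx] at p34; exact absurd p34 (by decide)
      simp [loopA, numbersA, words3, words4, h1, Ne.symm h1, h2, Ne.symm h2, h3, Ne.symm n6, Ne.symm h4, h5, PySem.Dict.get?, beq_iff_eq]
    by_cases h6 : PySem.List.slice input.toList (some index) (some (index + 3)) = ['s','i','x']
    · simp [loopA, numbersA, words3, h1, Ne.symm h1, h2, Ne.symm h2, h3, h4, h5, h6, PySem.Dict.get?, beq_iff_eq]
    by_cases h7 : PySem.List.slice input.toList (some index) (some (index + 5)) = ['s','e','v','e','n']
    · have hf : ((PySem.List.slice input.toList (some index) (some (index + 5))).length : Int) = 5 := by rw [h7]; rfl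
      have p45 := slice_prefix_of_full input.toList index 4 5 (by omega) (by omega) hf
      rw [h7] at p45
      have n9 : PySem.List.slice input.toList (some index) (some (index + 4)) ≠ ['n','i','n','e'] := by
        intro hx; rw [hx] at p45; exact absurd p45 (by decide)
      simp [loopA, numbersA, words3, words4, words5, h1, Ne.symm h1, h2, Ne.symm h2, Ne.symm h3, h4, Ne.symm h4, h5, Ne.symm h5, h6, Ne.symm h6, Ne.symm n9, h7, PySem.Dict.get?, beq_iff_eq]
    by_cases h8 : PySem.List.slice input.toList (some index) (some (index + 5)) = ['e','i','g','h','t']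
    · have hf : ((PySem.List.slice input.toList (some index) (some (index + 5))).length : Int) = 5 := by rw [h8]; rfl
      have p45 := slice_prefix_of_full input.toList index 4 5 (by omega) (by omega) hf
      rw [h8] at p45
      have n9 : PySem.List.slice input.toList (some index) (some (index + 4)) ≠ ['n','i','n','e'] := by
        intro hx; rw [hx] at p45; exact absurd p45 (by decide)
      simp [loopA, numbersA, words3, words4, words5, h1, Ne.symm h1, h2, Ne.symm h2, Ne.symm h3, h4, Ne.symm h4, h5, Ne.symm h5, h6, Ne.symm h6, Ne.symm h7, Ne.symm n9, h8, PySem.Dict.get?, beq_iff_eq]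
    by_cases h9 : PySem.List.slice input.toList (some index) (some (index + 4)) = ['n','i','n','e']
    · simp [loopA, numbersA, words3, words4, words5, h1, Ne.symm h1, h2, Ne.symm h2, h3, Ne.symm h3, h4, Ne.symm h4, h5, Ne.symm h5, h6, Ne.symm h6, h7, Ne.symm h7, h8, Ne.symm h8, h9, PySem.Dict.get?, beq_iff_eq]
    simp [loopA, numbersA, words3, words4, words5, h1, Ne.symm h1, h2, Ne.symm h2, h3, Ne.symm h3, h4, Ne.symm h4, h5, Ne.symm h5, h6, Ne.symm h6, h7, Ne.symm h7, h8, Ne.symm h8, h9, Ne.symm h9, PySem.Dict.get?, beq_iff_eq]
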